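-- pv_equiv track=rewrite | github.com/hei521/DL-120243505008-python-oj | src/problem92.py | calculate_perimeter_sum
-- ===== SOURCE A (Python) =====
-- def calculate_perimeter_sum(matrix, m, n):
--     if m == 1 and n == 1:
--         return matrix[0][0]
--
--     perimeter_sum = 0
--
--     for j in range(n):
--         perimeter_sum += matrix[0][j]
--         if m > 1:
--             perimeter_sum += matrix[m-1][j]
--
--     for i in range(1, m-1):
--         perimeter_sum += matrix[i][0]
--         if n > 1:
--             perimeter_sum += matrix[i][n-1]
--
--     return perimeter_sum
-- ===== SOURCE B (Python) =====
-- def calculate_perimeter_sum(matrix, m, n):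
--     total = 0
--     for i in range(m):
--         for j in range(n):
--             if i == 0 or i == m - 1 or j == 0 or j == n - 1:
--                 total += matrix[i][j]
--     return total
-- ===== Notes on version B (the rewrite author's own statement) =====
-- stated objective: simpler
-- what changed: Replaces A's border walk (top/bottom rows, then interior side columns, with a 1x1 early return and m>1/n>1 guards) by a single nested scan over all m*n cells that adds matrix[i][j] exactly when the cell is on the border.
-- intended difference: On degenerate dimension arguments (m <= 0 with n >= 1, or n <= 0 with m >= 3) A still walks part of the matrix and returns a partial border sum (e.g. A([[1,2]],0,2)=3), while B returns 0, the sum over the empty m x n cell grid, which is the intended value for a degenerate dimension. — e.g. on calculate_perimeter_sum([[1, 2]], 0, 2): A returns 3, B returns 0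
import Mathlib
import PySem

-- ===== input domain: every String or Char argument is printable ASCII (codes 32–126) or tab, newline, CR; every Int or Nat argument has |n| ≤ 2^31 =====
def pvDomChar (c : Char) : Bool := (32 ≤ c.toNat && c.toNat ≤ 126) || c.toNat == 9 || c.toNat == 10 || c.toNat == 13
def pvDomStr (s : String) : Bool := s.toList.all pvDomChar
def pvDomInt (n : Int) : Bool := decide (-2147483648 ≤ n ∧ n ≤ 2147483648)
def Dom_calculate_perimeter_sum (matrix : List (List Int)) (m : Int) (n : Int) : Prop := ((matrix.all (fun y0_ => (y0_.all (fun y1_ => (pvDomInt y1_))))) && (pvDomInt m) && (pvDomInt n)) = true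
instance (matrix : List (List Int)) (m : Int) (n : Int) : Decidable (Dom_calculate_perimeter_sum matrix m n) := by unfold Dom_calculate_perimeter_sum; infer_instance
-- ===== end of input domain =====

-- B replaces A's border walk by a single nested scan over all cells with a border membership test (objective: simpler).


-- ===== PORT A =====
def calculate_perimeter_sum (matrix : List (List Int)) (m : Int) (n : Int) : Int :=
  if m = 1 ∧ n = 1 then
    PySem.List.pyGetD (PySem.List.pyGetD matrix 0 []) 0 0
  else
    -- second loop runs on the accumulator produced by the first loop
    (PySem.List.pyRange 1 (m - 1) 1).foldl (fun acc i =>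
      if n > 1 then
        acc + PySem.List.pyGetD (PySem.List.pyGetD matrix i []) 0 0
            + PySem.List.pyGetD (PySem.List.pyGetD matrix i []) (n - 1) 0
      else acc + PySem.List.pyGetD (PySem.List.pyGetD matrix i []) 0 0)
      ((PySem.List.pyRange 0 n 1).foldl (fun acc j =>
        if m > 1 then
          acc + PySem.List.pyGetD (PySem.List.pyGetD matrix 0 []) j 0
              + PySem.List.pyGetD (PySem.List.pyGetD matrix (m - 1) []) j 0
        else acc + PySem.List.pyGetD (PySem.List.pyGetD matrix 0 []) j 0) 0)

-- ===== PORT B =====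
def calculate_perimeter_sum_alt (matrix : List (List Int)) (m : Int) (n : Int) : Int :=
  (PySem.List.pyRange 0 m 1).foldl (fun acc i =>
    (PySem.List.pyRange 0 n 1).foldl (fun acc j =>
      if i = 0 ∨ i = m - 1 ∨ j = 0 ∨ j = n - 1
      then acc + PySem.List.pyGetD (PySem.List.pyGetD matrix i []) j 0
      else acc) acc) 0

-- ===== PRECONDITION & SPEC =====
-- row i of the matrix (all indices used by A are nonnegative)
def pvRowLen (matrix : List (List Int)) (i : Int) : Int := ((matrix.getD i.toNat []).length : Int)

-- Pre_ is exactly the set of inputs on which the Python A returns normally (no IndexError):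
-- every cell A's walk reads exists.
def Pre_calculate_perimeter_sum (matrix : List (List Int)) (m : Int) (n : Int) : Prop :=
  (m = 1 ∧ n = 1 → 1 ≤ (matrix.length : Int) ∧ 1 ≤ pvRowLen matrix 0) ∧
  (¬(m = 1 ∧ n = 1) →
    (1 ≤ n → 1 ≤ (matrix.length : Int) ∧ n ≤ pvRowLen matrix 0 ∧
      (2 ≤ m → m ≤ (matrix.length : Int) ∧ n ≤ pvRowLen matrix (m - 1))) ∧
    (3 ≤ m → m - 1 ≤ (matrix.length : Int) ∧
      ∀ i ∈ PySem.List.pyRange 1 (m - 1) 1,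
        1 ≤ pvRowLen matrix i ∧ (2 ≤ n → n ≤ pvRowLen matrix i)))
instance (matrix : List (List Int)) (m : Int) (n : Int) : Decidable (Pre_calculate_perimeter_sum matrix m n) := by unfold Pre_calculate_perimeter_sum; infer_instance

def pvWitness_calculate_perimeter_sum : List (List Int) × Int × Int := ([[1, 2, 3], [4, 5, 6], [7, 8, 9]], 3, 3)

-- On degenerate dimension arguments (m ≤ 0 with n ≥ 1, or n ≤ 0 with m ≥ 3) A still walks part of
-- the matrix and returns a partial border sum; B returns 0, the sum over the empty m×n cell grid,
-- which is the intended value for a degenerate dimension.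
def D_calculate_perimeter_sum (matrix : List (List Int)) (m : Int) (n : Int) : Prop :=
  (m ≤ 0 ∧ 1 ≤ n) ∨ (n ≤ 0 ∧ 3 ≤ m)
instance (matrix : List (List Int)) (m : Int) (n : Int) : Decidable (D_calculate_perimeter_sum matrix m n) := by unfold D_calculate_perimeter_sum; infer_instance

def Spec_calculate_perimeter_sum (matrix : List (List Int)) (m : Int) (n : Int) (out : Int) : Prop := ¬ D_calculate_perimeter_sum matrix m n → out = calculate_perimeter_sum_alt matrix m n
instance (matrix : List (List Int)) (m : Int) (n : Int) (out : Int) : Decidable (Spec_calculate_perimeter_sum matrix m n out) := by unfold Spec_calculate_perimeter_sum; infer_instance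

def pvDiffWitness_calculate_perimeter_sum : List (List Int) × Int × Int := ([[1, 2]], 0, 2)
def pvDiffWitnessOut_calculate_perimeter_sum : Int × Int := (3, 0)

-- ===== CLAIM (what is proved, stated in full; the proofs are below) =====
def Claim_unchanged_calculate_perimeter_sum : Prop := ∀ (matrix : List (List Int)) (m : Int) (n : Int), Dom_calculate_perimeter_sum matrix m n → Pre_calculate_perimeter_sum matrix m n → Spec_calculate_perimeter_sum matrix m n (calculate_perimeter_sum matrix m n)
def Claim_changed_calculate_perimeter_sum : Prop := Dom_calculate_perimeter_sum (pvDiffWitness_calculate_perimeter_sum.1) (pvDiffWitness_calculate_perimeter_sum.2.1) (pvDiffWitness_calculate_perimeter_sum.2.2) ∧ Pre_calculate_perimeter_sum (pvDiffWitness_calculate_perimeter_sum.1) (pvDiffWitness_calculate_perimeter_sum.2.1) (pvDiffWitness_calculate_perimeter_sum.2.2) ∧ D_calculate_perimeter_sum (pvDiffWitness_calculate_perimeter_sum.1) (pvDiffWitness_calculate_perimeter_sum.2.1) (pvDiffWitness_calculate_perimeter_sum.2.2) ∧ calculate_perimeter_sum (pvDiffWitness_calculate_perimeter_sum.1) (pvDiffWitness_calculate_perimeter_sum.2.1)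 (pvDiffWitness_calculate_perimeter_sum.2.2) = pvDiffWitnessOut_calculate_perimeter_sum.1 ∧ calculate_perimeter_sum_alt (pvDiffWitness_calculate_perimeter_sum.1) (pvDiffWitness_calculate_perimeter_sum.2.1) (pvDiffWitness_calculate_perimeter_sum.2.2) = pvDiffWitnessOut_calculate_perimeter_sum.2 ∧ pvDiffWitnessOut_calculate_perimeter_sum.1 ≠ pvDiffWitnessOut_calculate_perimeter_sum.2

-- ===== LEMMAS AND PROOFS =====

-- sum of row i over columns 0..n-1
def pvRowSum (matrix : List (List Int)) (n i : Int) : Int :=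
  ((PySem.List.pyRange 0 n 1).map (fun j => PySem.List.pyGetD (PySem.List.pyGetD matrix i []) j 0)).sum

-- contribution of an interior row: its two end cells (one cell when n = 1)
def pvEnds (matrix : List (List Int)) (n i : Int) : Int :=
  PySem.List.pyGetD (PySem.List.pyGetD matrix i []) 0 0
    + (if 1 < n then PySem.List.pyGetD (PySem.List.pyGetD matrix i []) (n - 1) 0 else 0)

-- summing 'if j = 0 or j = n-1' over range(n) picks out column 0 and (when n > 1) column n-1
theorem pv_sum_ends (n : Int) (hn : 1 ≤ n) (g : Int → Int) :
    ((PySem.List.pyRange 0 n 1).map (fun j => if j = 0 ∨ j = n - 1 then g j else 0)).sum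
      = g 0 + (if 1 < n then g (n - 1) else 0) := by
  rcases eq_or_lt_of_le hn with h1 | h2
  · have hn1 : n = 1 := h1.symm
    subst hn1
    have h01 : PySem.List.pyRange 0 1 1 = [0] := by
      simpa using PySem.List.pyRange_one_singleton 0
    rw [h01]
    norm_num
  · have hsplit : PySem.List.pyRange 0 n 1
        = PySem.List.pyRange 0 (n - 1) 1 ++ PySem.List.pyRange (n - 1) n 1 :=
      PySem.List.pyRange_one_append 0 (n - 1) n (by omega) (by omega)
    have hlast : PySem.List.pyRange (n - 1) n 1 = [n - 1] := by
      have hn' : n = (n - 1) + 1 := by omega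
      rw [hn']; simpa using PySem.List.pyRange_one_singleton (n - 1)
    have hcons : PySem.List.pyRange 0 (n - 1) 1 = 0 :: PySem.List.pyRange 1 (n - 1) 1 :=
      PySem.List.pyRange_one_cons (by omega)
    rw [hsplit, hlast, hcons]
    have hmid : ((PySem.List.pyRange 1 (n - 1) 1).map
        (fun j => if j = 0 ∨ j = n - 1 then g j else 0)).sum = 0 := by
      apply List.sum_eq_zero
      intro x hx
      obtain ⟨j, hj, rfl⟩ := List.mem_map.mp hx
      have hjr := (PySem.List.mem_pyRange_one).mp hj
      rw [if_neg (by omega)]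
    simp only [List.map_append, List.map_cons, List.sum_append, List.sum_cons, List.map_nil,
      List.sum_nil, hmid]
    simp [h2]

-- B's outer loop evaluated row by row
theorem pv_B_eq (matrix : List (List Int)) (m n : Int) (hn : 1 ≤ n) :
    calculate_perimeter_sum_alt matrix m n
      = ((PySem.List.pyRange 0 m 1).map
          (fun i => if i = 0 ∨ i = m - 1 then pvRowSum matrix n i else pvEnds matrix n i)).sum := by
  unfold calculate_perimeter_sum_alt
  have hcong := PySem.List.foldl_congr_mem (PySem.List.pyRange 0 m 1)
    (fun acc i =>
      (PySem.List.pyRange 0 n 1).foldl (fun acc j =>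
        if i = 0 ∨ i = m - 1 ∨ j = 0 ∨ j = n - 1
        then acc + PySem.List.pyGetD (PySem.List.pyGetD matrix i []) j 0
        else acc) acc)
    (fun acc i => acc + (if i = 0 ∨ i = m - 1 then pvRowSum matrix n i else pvEnds matrix n i))
    0
    (by
      intro acc i _
      dsimp only
      by_cases hib : i = 0 ∨ i = m - 1
      · rw [if_pos hib]
        have h1 := PySem.List.foldl_congr_mem (PySem.List.pyRange 0 n 1)
          (fun acc j =>
            if i = 0 ∨ i = m - 1 ∨ j = 0 ∨ j = n - 1
            then acc + PySem.List.pyGetD (PySem.List.pyGetD matrix i []) j 0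
            else acc)
          (fun acc j => acc + PySem.List.pyGetD (PySem.List.pyGetD matrix i []) j 0)
          acc
          (by intro acc j _; dsimp only; rw [if_pos (by tauto)])
        rw [h1, PySem.List.foldl_add]
        rfl
      · push Not at hib
        rw [if_neg (by tauto)]
        have h1 := PySem.List.foldl_congr_mem (PySem.List.pyRange 0 n 1)
          (fun acc j =>
            if i = 0 ∨ i = m - 1 ∨ j = 0 ∨ j = n - 1
            then acc + PySem.List.pyGetD (PySem.List.pyGetD matrix i []) j 0
            else acc)
          (fun acc j => acc + (if j = 0 ∨ j = n - 1
            then PySem.List.pyGetD (PySem.List.pyGetD matrix i []) j 0 else 0))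
          acc
          (by
            intro acc j _
            dsimp only
            by_cases hj : j = 0 ∨ j = n - 1
            · rw [if_pos (by tauto), if_pos hj]
            · rw [if_neg (by tauto), if_neg hj, add_zero])
        rw [h1, PySem.List.foldl_add, pv_sum_ends n hn]
        rfl)
  rw [hcong, PySem.List.foldl_add, zero_add]

-- A's two loops evaluated, in the main case m ≥ 2
theorem pv_A_eq (matrix : List (List Int)) (m n : Int) (hm2 : 2 ≤ m) :
    calculate_perimeter_sum matrix m n
      = (pvRowSum matrix n 0 + pvRowSum matrix n (m - 1))
          + ((PySem.List.pyRange 1 (m - 1) 1).map (fun i => pvEnds matrix n i)).sum := by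
  unfold calculate_perimeter_sum
  rw [if_neg (by omega)]
  have h1 := PySem.List.foldl_congr_mem (PySem.List.pyRange 0 n 1)
    (fun acc j =>
      if m > 1 then
        acc + PySem.List.pyGetD (PySem.List.pyGetD matrix 0 []) j 0
            + PySem.List.pyGetD (PySem.List.pyGetD matrix (m - 1) []) j 0
      else acc + PySem.List.pyGetD (PySem.List.pyGetD matrix 0 []) j 0)
    (fun acc j => acc + (PySem.List.pyGetD (PySem.List.pyGetD matrix 0 []) j 0
        + PySem.List.pyGetD (PySem.List.pyGetD matrix (m - 1) []) j 0))
    0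
    (by
      intro acc j _
      dsimp only
      rw [if_pos (show m > 1 by omega)]
      ring)
  have h2 := PySem.List.foldl_congr_mem (PySem.List.pyRange 1 (m - 1) 1)
    (fun acc i =>
      if n > 1 then
        acc + PySem.List.pyGetD (PySem.List.pyGetD matrix i []) 0 0
            + PySem.List.pyGetD (PySem.List.pyGetD matrix i []) (n - 1) 0
      else acc + PySem.List.pyGetD (PySem.List.pyGetD matrix i []) 0 0)
    (fun acc i => acc + pvEnds matrix n i)
    ((PySem.List.pyRange 0 n 1).foldl (fun acc j =>
      if m > 1 then
        acc + PySem.List.pyGetD (PySem.List.pyGetD matrix 0 []) j 0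
            + PySem.List.pyGetD (PySem.List.pyGetD matrix (m - 1) []) j 0
      else acc + PySem.List.pyGetD (PySem.List.pyGetD matrix 0 []) j 0) 0)
    (by
      intro acc i _
      dsimp only
      unfold pvEnds
      by_cases hn1 : 1 < n
      · rw [if_pos hn1, if_pos hn1]; ring
      · rw [if_neg hn1, if_neg hn1]; ring)
  rw [h2, h1, PySem.List.foldl_add, PySem.List.foldl_add, zero_add]
  have hsum : ((PySem.List.pyRange 0 n 1).map
      (fun j => PySem.List.pyGetD (PySem.List.pyGetD matrix 0 []) j 0
        + PySem.List.pyGetD (PySem.List.pyGetD matrix (m - 1) []) j 0)).sum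
      = pvRowSum matrix n 0 + pvRowSum matrix n (m - 1) := by
    unfold pvRowSum
    induction PySem.List.pyRange 0 n 1 with
    | nil => simp
    | cons x xs ih => simp only [List.map_cons, List.sum_cons, ih]; ring
  rw [hsum]

-- both programs agree whenever m >= 1 and n >= 1 (any matrix: out-of-range reads never happen under Pre_,
-- and the pyGetD defaults coincide on both sides)
theorem pv_main (matrix : List (List Int)) (m n : Int) (hm : 1 ≤ m) (hn : 1 ≤ n) :
    calculate_perimeter_sum matrix m n = calculate_perimeter_sum_alt matrix m n := by
  rw [pv_B_eq matrix m n hn]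
  by_cases hm1 : m = 1
  · -- one-row matrix: both sides sum row 0
    subst hm1
    have h01 : PySem.List.pyRange 0 1 1 = [0] := by
      simpa using PySem.List.pyRange_one_singleton 0
    rw [h01]
    simp only [List.map_cons, List.map_nil, List.sum_cons, List.sum_nil]
    simp only [true_or, if_true, add_zero]
    unfold calculate_perimeter_sum
    by_cases hn1 : n = 1
    · subst hn1
      rw [if_pos ⟨rfl, rfl⟩]
      unfold pvRowSum
      rw [h01]
      norm_num
    · rw [if_neg (by omega)]
      have hnil : PySem.List.pyRange 1 (1 - 1) 1 = [] :=
        PySem.List.pyRange_one_eq_nil (by omega)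
      rw [hnil, List.foldl_nil]
      have h1 := PySem.List.foldl_congr_mem (PySem.List.pyRange 0 n 1)
        (fun acc j =>
          if (1 : Int) > 1 then
            acc + PySem.List.pyGetD (PySem.List.pyGetD matrix 0 []) j 0
                + PySem.List.pyGetD (PySem.List.pyGetD matrix (1 - 1) []) j 0
          else acc + PySem.List.pyGetD (PySem.List.pyGetD matrix 0 []) j 0)
        (fun acc j => acc + PySem.List.pyGetD (PySem.List.pyGetD matrix 0 []) j 0)
        0
        (by intro acc j _; dsimp only; rw [if_neg (by omega)])
      rw [h1, PySem.List.foldl_add, zero_add]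
      rfl
  · -- m ≥ 2: split B's row list into row 0, interior rows, row m-1
    have hm2 : 2 ≤ m := by omega
    rw [pv_A_eq matrix m n hm2]
    have hsplit : PySem.List.pyRange 0 m 1
        = (0 :: PySem.List.pyRange 1 (m - 1) 1) ++ [m - 1] := by
      rw [PySem.List.pyRange_one_append 0 (m - 1) m (by omega) (by omega)]
      congr 1
      · exact PySem.List.pyRange_one_cons (by omega)
      · have hm' : m = (m - 1) + 1 := by omega
        rw [hm']; simpa using PySem.List.pyRange_one_singleton (m - 1)
    rw [hsplit]
    simp only [List.map_append, List.map_cons, List.map_nil, List.sum_append, List.sum_cons,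
      List.sum_nil]
    simp only [true_or, or_true, if_true]
    have hmidc : (PySem.List.pyRange 1 (m - 1) 1).map
        (fun i => if i = 0 ∨ i = m - 1 then pvRowSum matrix n i else pvEnds matrix n i)
        = (PySem.List.pyRange 1 (m - 1) 1).map (fun i => pvEnds matrix n i) :=
      List.map_congr_left (fun i hi => by
        have hir := (PySem.List.mem_pyRange_one).mp hi
        exact if_neg (by omega))
    rw [hmidc]
    ring

-- ===== VERDICT (by name: the statement is the Claim_ definition above) =====
theorem calculate_perimeter_sum_spec : Claim_unchanged_calculate_perimeter_sum := by
  intro matrix m n _ _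
  unfold Spec_calculate_perimeter_sum
  intro hnd
  unfold D_calculate_perimeter_sum at hnd
  by_cases hm : 1 ≤ m
  · by_cases hn : 1 ≤ n
    · exact pv_main matrix m n hm hn
    · -- n ≤ 0 and (by ¬D_) m ≤ 2: both walks are empty
      have hm2 : m ≤ 2 := by omega
      have hn0 : PySem.List.pyRange 0 n 1 = [] := PySem.List.pyRange_one_eq_nil (by omega)
      have hmid : PySem.List.pyRange 1 (m - 1) 1 = [] := PySem.List.pyRange_one_eq_nil (by omega)
      unfold calculate_perimeter_sum calculate_perimeter_sum_alt
      rw [if_neg (by omega), hn0, hmid]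
      simp
  · -- m ≤ 0 and (by ¬D_) n ≤ 0: both walks are empty
    have hn0 : PySem.List.pyRange 0 n 1 = [] := PySem.List.pyRange_one_eq_nil (by omega)
    have hm0 : PySem.List.pyRange 0 m 1 = [] := PySem.List.pyRange_one_eq_nil (by omega)
    have hmid : PySem.List.pyRange 1 (m - 1) 1 = [] := PySem.List.pyRange_one_eq_nil (by omega)
    unfold calculate_perimeter_sum calculate_perimeter_sum_alt
    rw [if_neg (by omega), hn0, hmid, hm0]
    simp

theorem calculate_perimeter_sum_changed : Claim_changed_calculate_perimeter_sum := by
  unfold Claim_changed_calculate_perimeter_sum; decide
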